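-- pv_equiv track=rewrite | github.com/maciek-nowak/python-erp-system | accounting/accounting.py | count_year_profit
-- ===== SOURCE A (Python) =====
-- def count_year_profit(table):
--     years = {}
--     for record in table:
--         year = record[3]
--         profit = 0
--         if record[4] == 'in':
--             profit += int(record[5])
--         elif record[4] == 'out':
--             profit -= int(record[5])
--         if year in years:
--             years[year] += profit
--         else:
--             years[year] = profit
--     return years
-- ===== SOURCE B (Python) =====
-- def count_year_profit(table):
--     years = dict.fromkeys(record[3] for record in table)
--     return {year: sum(int(record[5]) if record[4] == 'in'
--                       else -int(record[5]) if record[4] == 'out'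
--                       else 0
--                       for record in table if record[3] == year)
--             for year in years}
-- ===== Notes on version B (the rewrite author's own statement) =====
-- stated objective: alternative
-- what changed: Replaces A's single streaming pass that accumulates into a dict with a two-phase decomposition: first collect the distinct years in first-occurrence order (dict.fromkeys), then build the result with a per-year comprehension that sums the signed amounts of that year's records.
import Mathlib
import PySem

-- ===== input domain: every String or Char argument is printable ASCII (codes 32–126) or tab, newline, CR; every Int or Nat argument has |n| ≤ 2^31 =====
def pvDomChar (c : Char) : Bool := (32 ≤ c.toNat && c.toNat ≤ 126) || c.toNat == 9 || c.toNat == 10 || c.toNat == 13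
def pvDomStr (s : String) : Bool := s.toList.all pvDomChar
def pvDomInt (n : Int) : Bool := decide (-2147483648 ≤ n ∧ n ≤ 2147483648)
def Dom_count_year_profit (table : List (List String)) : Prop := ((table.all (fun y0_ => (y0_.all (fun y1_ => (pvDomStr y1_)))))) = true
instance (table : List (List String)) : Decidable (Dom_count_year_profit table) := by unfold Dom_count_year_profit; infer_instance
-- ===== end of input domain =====

-- B replaces A's one-pass dict accumulation with a two-phase decomposition: collect distinct years
-- (first-occurrence order), then sum each year's signed amounts in a per-year pass (objective: alternative).

-- ===== PORT A =====
-- Streaming pass: for each record compute profit, then add it into (or create) the year's dict entry.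
def count_year_profit (table : List (List String)) : List (String × Int) :=
  (table.foldl (fun (years : PySem.Dict String Int) record =>
    let year := (PySem.List.pyGet? record 3).getD ""
    let profit : Int := 0
    let profit :=
      if (PySem.List.pyGet? record 4).getD "" = "in" then
        profit + ((PySem.Int.ofStr? ((PySem.List.pyGet? record 5).getD "")).getD 0)
      else if (PySem.List.pyGet? record 4).getD "" = "out" then
        profit - ((PySem.Int.ofStr? ((PySem.List.pyGet? record 5).getD "")).getD 0)
      else profit
    if years.contains year then years.insert year (years.getD year 0 + profit)
    else years.insert year profit) PySem.Dict.empty).items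

-- ===== PORT B =====
-- record[3]  (total with default; Pre_ guarantees the index is in range)
def pvYearOf (record : List String) : String := (PySem.List.pyGet? record 3).getD ""

-- the signed amount of one record: int(record[5]) if 'in', -int(record[5]) if 'out', else 0
def pvSignedOf (record : List String) : Int :=
  if (PySem.List.pyGet? record 4).getD "" = "in" then
    ((PySem.Int.ofStr? ((PySem.List.pyGet? record 5).getD "")).getD 0)
  else if (PySem.List.pyGet? record 4).getD "" = "out" then
    -((PySem.Int.ofStr? ((PySem.List.pyGet? record 5).getD "")).getD 0)
  else 0

-- distinct years in first-occurrence order (dict.fromkeys), then one sum per year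
def count_year_profit_alt (table : List (List String)) : List (String × Int) :=
  (PySem.List.dedup (table.map pvYearOf)).map
    (fun year => (year, ((table.filter (fun record => pvYearOf record == year)).map pvSignedOf).sum))

-- ===== PRECONDITION & SPEC =====
-- Pre_ excludes exactly the inputs on which Python A raises: a record shorter than 5 (IndexError on
-- record[3]/record[4]), and a record whose tag is 'in'/'out' but lacks a parseable int at record[5]
-- (IndexError/ValueError).
def Pre_count_year_profit (table : List (List String)) : Prop :=
  ∀ record ∈ table, 4 < record.length ∧
    ((record.getD 4 "" = "in" ∨ record.getD 4 "" = "out") →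
      5 < record.length ∧ (PySem.Int.ofStr? (record.getD 5 "")).isSome)
instance (table : List (List String)) : Decidable (Pre_count_year_profit table) := by
  unfold Pre_count_year_profit; infer_instance

def pvWitness_count_year_profit : List (List String) :=
  [["a", "b", "c", "2020", "in", "5"], ["a", "b", "c", "2020", "out", "2"],
   ["d", "e", "f", "2021", "off", "zz"]]

def Spec_count_year_profit (table : List (List String)) (out : List (String × Int)) : Prop :=
  out = count_year_profit_alt table
instance (table : List (List String)) (out : List (String × Int)) :
    Decidable (Spec_count_year_profit table out) := by unfold Spec_count_year_profit; infer_instance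

-- ===== CLAIM (what is proved, stated in full; the proofs are below) =====
def Claim_equal_count_year_profit : Prop :=
  ∀ (table : List (List String)), Dom_count_year_profit table → Pre_count_year_profit table →
    Spec_count_year_profit table (count_year_profit table)

-- ===== LEMMAS AND PROOFS =====

-- the per-year sum B computes
def pvSumFor (table : List (List String)) (year : String) : Int :=
  ((table.filter (fun record => pvYearOf record == year)).map pvSignedOf).sum

-- One step of A's fold is always an insert of (old value + signed amount).
theorem pvStepA_eq (years : PySem.Dict String Int) (record : List String) :
    (let year := (PySem.List.pyGet? record 3).getD ""
     let profit : Int := 0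
     let profit :=
       if (PySem.List.pyGet? record 4).getD "" = "in" then
         profit + ((PySem.Int.ofStr? ((PySem.List.pyGet? record 5).getD "")).getD 0)
       else if (PySem.List.pyGet? record 4).getD "" = "out" then
         profit - ((PySem.Int.ofStr? ((PySem.List.pyGet? record 5).getD "")).getD 0)
       else profit
     if years.contains year then years.insert year (years.getD year 0 + profit)
     else years.insert year profit)
    = years.insert (pvYearOf record) (years.getD (pvYearOf record) 0 + pvSignedOf record) := by
  have hP : (if (PySem.List.pyGet? record 4).getD "" = "in" then
        (0:Int) + ((PySem.Int.ofStr? ((PySem.List.pyGet? record 5).getD "")).getD 0)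
      else if (PySem.List.pyGet? record 4).getD "" = "out" then
        (0:Int) - ((PySem.Int.ofStr? ((PySem.List.pyGet? record 5).getD "")).getD 0)
      else (0:Int)) = pvSignedOf record := by
    simp only [pvSignedOf]; split_ifs <;> ring
  simp only [pvYearOf, hP]
  by_cases hc : years.contains ((PySem.List.pyGet? record 3).getD "")
  · simp [hc]
  · have h0 : years.getD ((PySem.List.pyGet? record 3).getD "") 0 = 0 :=
      PySem.Dict.getD_of_not_contains years 0 (by simpa using hc)
    simp [hc, h0]

-- Loop invariant: folding A's step over `table` from a dict with Nodup keys produces, as items,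
-- the updated key set mapped to old value + per-year sum.
theorem pvFoldA_items (table : List (List String)) (d : PySem.Dict String Int)
    (hnd : d.keys.Nodup) :
    (table.foldl (fun (years : PySem.Dict String Int) record =>
        let year := (PySem.List.pyGet? record 3).getD ""
        let profit : Int := 0
        let profit :=
          if (PySem.List.pyGet? record 4).getD "" = "in" then
            profit + ((PySem.Int.ofStr? ((PySem.List.pyGet? record 5).getD "")).getD 0)
          else if (PySem.List.pyGet? record 4).getD "" = "out" then
            profit - ((PySem.Int.ofStr? ((PySem.List.pyGet? record 5).getD "")).getD 0)
          else profit
        if years.contains year then years.insert year (years.getD year 0 + profit)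
        else years.insert year profit) d).items
    = (PySem.Set.update d.keys (table.map pvYearOf)).map
        (fun y => (y, d.getD y 0 + pvSumFor table y)) := by
  induction table generalizing d with
  | nil =>
    simp only [List.foldl_nil, List.map_nil, PySem.Set.update_nil, pvSumFor, List.filter_nil,
      List.map_nil, List.sum_nil, add_zero]
    exact PySem.Dict.items_eq_map_keys d hnd 0
  | cons r rest ih =>
    rw [List.foldl_cons, pvStepA_eq]
    have hnd' : ((d.insert (pvYearOf r) (d.getD (pvYearOf r) 0 + pvSignedOf r)).keys).Nodup :=
      PySem.Dict.nodup_keys_insert _ _ _ hnd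
    rw [ih _ hnd']
    have hkeys : (d.insert (pvYearOf r) (d.getD (pvYearOf r) 0 + pvSignedOf r)).keys
        = PySem.Set.add d.keys (pvYearOf r) := by
      by_cases hc : d.contains (pvYearOf r)
      · rw [PySem.Dict.keys_insert_of_contains _ _ hc,
          PySem.Set.add_of_mem ((PySem.Dict.contains_iff_mem_keys _ _).mp hc)]
      · rw [PySem.Dict.keys_insert_of_not_contains _ _ (by simpa using hc),
          PySem.Set.add_of_not_mem
            (fun hm => hc ((PySem.Dict.contains_iff_mem_keys _ _).mpr hm))]
    rw [hkeys, List.map_cons, PySem.Set.update_cons]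
    apply List.map_congr_left
    intro y _
    have hsum : pvSumFor (r :: rest) y
        = (if pvYearOf r == y then pvSignedOf r else 0) + pvSumFor rest y := by
      simp only [pvSumFor, List.filter_cons]
      by_cases h : pvYearOf r == y <;> simp [h]
    by_cases hy : y = pvYearOf r
    · subst hy
      rw [PySem.Dict.getD_insert_self, hsum]
      simp [add_assoc]
    · rw [PySem.Dict.getD_insert_of_ne _ _ _ hy, hsum]
      have : (pvYearOf r == y) = false := by
        simp only [beq_eq_false_iff_ne]; exact fun h => hy h.symm
      simp [this]

-- ===== VERDICT (by name: the statement is the Claim_ definition above) =====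
theorem count_year_profit_spec : Claim_equal_count_year_profit := by
  intro table _ _
  unfold Spec_count_year_profit count_year_profit count_year_profit_alt
  rw [pvFoldA_items table PySem.Dict.empty (by simp [PySem.Dict.keys_empty])]
  simp only [PySem.Dict.keys_empty, PySem.Set.update_nil_left, PySem.Dict.getD_empty, zero_add,
    PySem.List.dedup_eq_ofList, pvSumFor]
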